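-- pv_equiv track=rewrite | github.com/Apolliner/Field-Mini-Game | NPC_waypoint_version.py | gluing_location
-- ===== SOURCE A (Python) =====
-- def gluing_location(raw_gluing_map, grid, count_block):
--     """
--         Склеивает чанки и локации в единое поле из "сырых" карт
--     """
--     value_region_box = grid * count_block
--     gluing_map = []
--     for empry_line in range(grid * count_block):
--         gluing_map.append([])
--
--     count_location = 0
--     for number_region_line in range(grid):
--         for number_region in range(grid):
--             for number_location_line in range(count_block):
--                 for number_location in range(count_block):
--                     gluing_index = (number_region_line + number_location_line) + (count_location//(grid*(count_block**2))*(count_block-1)) #определяет индекс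
--                     gluing_map[gluing_index].append(raw_gluing_map[number_region_line][number_region][number_location_line][number_location])
--                     count_location += 1
--     return gluing_map
-- ===== SOURCE B (Python) =====
-- def gluing_location(raw_gluing_map, grid, count_block):
--     """Glue chunk maps into one field: build each output row directly (gather)."""
--     gluing_map = []
--     for number_region_line in range(grid):
--         for number_location_line in range(count_block):
--             row = []
--             for number_region in range(grid):
--                 for number_location in range(count_block):
--                     row.append(raw_gluing_map[number_region_line][number_region][number_location_line][number_location])
--             gluing_map.append(row)
--     return gluing_map
-- ===== Notes on version B (the rewrite author's own statement) =====
-- stated objective: simpler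
-- what changed: B gathers each output row directly from the raw map (building rows one by one) instead of A's scatter that pre-allocates grid*count_block empty rows and appends into them via a running element counter and derived floor-division index arithmetic.
-- intended difference: When grid and count_block are both negative, A returns grid*count_block pre-allocated empty rows (an artefact of its range(grid*count_block) pre-allocation, whose product is positive), while B returns the empty field, the intended result for nonpositive dimensions. — e.g. on gluing_location([], -1, -1): A returns [[]], B returns []
import Mathlib
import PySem

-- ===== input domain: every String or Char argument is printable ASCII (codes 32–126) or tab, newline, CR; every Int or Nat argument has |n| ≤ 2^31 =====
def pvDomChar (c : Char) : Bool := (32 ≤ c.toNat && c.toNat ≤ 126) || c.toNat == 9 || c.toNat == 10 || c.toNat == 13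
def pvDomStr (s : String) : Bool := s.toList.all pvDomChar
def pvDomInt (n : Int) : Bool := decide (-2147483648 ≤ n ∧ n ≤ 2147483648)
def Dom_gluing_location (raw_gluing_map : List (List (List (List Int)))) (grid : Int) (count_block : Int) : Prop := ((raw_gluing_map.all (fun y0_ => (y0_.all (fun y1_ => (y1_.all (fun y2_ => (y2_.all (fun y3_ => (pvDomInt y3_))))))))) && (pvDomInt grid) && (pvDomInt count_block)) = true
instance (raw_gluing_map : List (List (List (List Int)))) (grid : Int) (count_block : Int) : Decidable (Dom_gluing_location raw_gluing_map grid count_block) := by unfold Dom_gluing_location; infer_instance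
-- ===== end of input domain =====

-- B gathers each output row directly from the raw map instead of A's scatter into
-- pre-allocated rows driven by a running counter and floor-division index arithmetic
-- (objective: simpler; return-value equivalence, no argument is mutated by either version).

-- ===== PORT A =====
-- Literal transliteration of A. Python list indexing raw[...] is ported with
-- PySem.List.pyGetD (the default is never reached inside Pre_, which demands the shape
-- Python needs to avoid IndexError). gluing_map[gluing_index].append(v) is ported as
-- List.modify at gluing_index.toNat: whenever the loops execute (grid>0, count_block>0)
-- the index is provably nonnegative and in range, so this is exact there.
def gluing_location (raw_gluing_map : List (List (List (List Int)))) (grid : Int) (count_block : Int) : List (List Int) :=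
  let _value_region_box := grid * count_block
  let gluing_map : List (List Int) :=
    (PySem.List.pyRange 0 (grid * count_block)).foldl (fun acc _ => acc ++ [[]]) []
  (((PySem.List.pyRange 0 grid).foldl (fun (st : List (List Int) × Int) number_region_line =>
      (PySem.List.pyRange 0 grid).foldl (fun st number_region =>
        (PySem.List.pyRange 0 count_block).foldl (fun st number_location_line =>
          (PySem.List.pyRange 0 count_block).foldl (fun st number_location =>
            let gluing_index : Int :=
              (number_region_line + number_location_line) +
                (PySem.Int.floordiv st.2 (grid * count_block ^ 2)) * (count_block - 1)
            (st.1.modify gluing_index.toNat (fun row => row ++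
                [PySem.List.pyGetD (PySem.List.pyGetD (PySem.List.pyGetD
                   (PySem.List.pyGetD raw_gluing_map number_region_line []) number_region [])
                   number_location_line []) number_location 0]),
             st.2 + 1)) st) st) st) (gluing_map, (0 : Int)))).1

-- ===== PORT B =====
-- Literal transliteration of B (Source B): build every output row afresh by gathering.
def gluing_location_alt (raw_gluing_map : List (List (List (List Int)))) (grid : Int) (count_block : Int) : List (List Int) :=
  (PySem.List.pyRange 0 grid).foldl (fun gluing_map number_region_line =>
    (PySem.List.pyRange 0 count_block).foldl (fun gluing_map number_location_line =>
      let row : List Int :=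
        (PySem.List.pyRange 0 grid).foldl (fun row number_region =>
          (PySem.List.pyRange 0 count_block).foldl (fun row number_location =>
            row ++ [PySem.List.pyGetD (PySem.List.pyGetD (PySem.List.pyGetD
              (PySem.List.pyGetD raw_gluing_map number_region_line []) number_region [])
              number_location_line []) number_location 0]) row) []
      gluing_map ++ [row]) gluing_map) []

-- ===== PRECONDITION & SPEC =====
-- Pre_ excludes exactly the inputs where Python A raises IndexError: positive grid and
-- count_block with a raw map too small for the indices the loops read.
def Pre_gluing_location (raw_gluing_map : List (List (List (List Int)))) (grid : Int) (count_block : Int) : Prop :=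
  0 < grid → 0 < count_block →
    grid.toNat ≤ raw_gluing_map.length ∧
    ∀ row ∈ raw_gluing_map.take grid.toNat, grid.toNat ≤ row.length ∧
      ∀ blk ∈ row.take grid.toNat, count_block.toNat ≤ blk.length ∧
        ∀ line ∈ blk.take count_block.toNat, count_block.toNat ≤ line.length
instance (raw_gluing_map : List (List (List (List Int)))) (grid : Int) (count_block : Int) : Decidable (Pre_gluing_location raw_gluing_map grid count_block) := by unfold Pre_gluing_location; infer_instance
def pvWitness_gluing_location : List (List (List (List Int))) × Int × Int := ([[[[7]]]], 1, 1)

-- When grid and count_block are both negative, A returns grid*count_block pre-allocated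
-- empty rows (an artefact of its range(grid*count_block) pre-allocation), while B returns
-- the empty field, the intended result for nonpositive dimensions.
def D_gluing_location (raw_gluing_map : List (List (List (List Int)))) (grid : Int) (count_block : Int) : Prop :=
  grid < 0 ∧ count_block < 0
instance (raw_gluing_map : List (List (List (List Int)))) (grid : Int) (count_block : Int) : Decidable (D_gluing_location raw_gluing_map grid count_block) := by unfold D_gluing_location; infer_instance

def Spec_gluing_location (raw_gluing_map : List (List (List (List Int)))) (grid : Int) (count_block : Int) (out : List (List Int)) : Prop := ¬ D_gluing_location raw_gluing_map grid count_block → out = gluing_location_alt raw_gluing_map grid count_block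
instance (raw_gluing_map : List (List (List (List Int)))) (grid : Int) (count_block : Int) (out : List (List Int)) : Decidable (Spec_gluing_location raw_gluing_map grid count_block out) := by unfold Spec_gluing_location; infer_instance

def pvDiffWitness_gluing_location : List (List (List (List Int))) × Int × Int := ([], -1, -1)
def pvDiffWitnessOut_gluing_location : (List (List Int)) × (List (List Int)) := ([[]], [])

-- ===== CLAIM (what is proved, stated in full; the proofs are below) =====
def Claim_unchanged_gluing_location : Prop := ∀ (raw_gluing_map : List (List (List (List Int)))) (grid : Int) (count_block : Int), Dom_gluing_location raw_gluing_map grid count_block → Pre_gluing_location raw_gluing_map grid count_block → Spec_gluing_location raw_gluing_map grid count_block (gluing_location raw_gluing_map grid count_block)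
def Claim_changed_gluing_location : Prop := Dom_gluing_location (pvDiffWitness_gluing_location.1) (pvDiffWitness_gluing_location.2.1) (pvDiffWitness_gluing_location.2.2) ∧ Pre_gluing_location (pvDiffWitness_gluing_location.1) (pvDiffWitness_gluing_location.2.1) (pvDiffWitness_gluing_location.2.2) ∧ D_gluing_location (pvDiffWitness_gluing_location.1) (pvDiffWitness_gluing_location.2.1) (pvDiffWitness_gluing_location.2.2) ∧ gluing_location (pvDiffWitness_gluing_location.1) (pvDiffWitness_gluing_location.2.1) (pvDiffWitness_gluing_location.2.2) = pvDiffWitnessOut_gluing_location.1 ∧ gluing_location_alt (pvDiffWitness_gluing_location.1) (pvDiffWitness_gluing_location.2.1) (pvDiffWitness_gluing_location.2.2) = pvDiffWitnessOut_gluing_location.2 ∧ pvDiffWitnessOut_gluing_location.1 ≠ pvDiffWitnessOut_gluing_location.2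
def Claim_exact_gluing_location : Prop := ∀ (raw_gluing_map : List (List (List (List Int)))) (grid : Int) (count_block : Int), Dom_gluing_location raw_gluing_map grid count_block → Pre_gluing_location raw_gluing_map grid count_block → D_gluing_location raw_gluing_map grid count_block → gluing_location raw_gluing_map grid count_block ≠ gluing_location_alt raw_gluing_map grid count_block

-- ===== LEMMAS AND PROOFS =====

def pvVal (m : List (List (List (List Int)))) (rl reg ll loc : Nat) : Int :=
  PySem.List.pyGetD (PySem.List.pyGetD (PySem.List.pyGetD
    (PySem.List.pyGetD m ↑rl []) ↑reg []) ↑ll []) ↑loc 0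

def pvRow (m : List (List (List (List Int)))) (C G rl ll : Nat) : List Int :=
  (List.range G).flatMap (fun reg => (List.range C).map (fun loc => pvVal m rl reg ll loc))

theorem pvModifyMapRange (N i : Nat) (φ : Nat → List Int) (f : List Int → List Int) :
    ((List.range N).map φ).modify i f
      = (List.range N).map (fun j => if j = i then f (φ j) else φ j) := by
  apply List.ext_getElem
  · simp [List.length_modify]
  · intro j hj hj'
    have hjN : j < N := by simpa using hj'
    rw [List.getElem_modify]
    by_cases hij : i = j
    · simp [hij]
    · have hji : j ≠ i := fun h' => hij h'.symm
      simp [hij, hji]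

theorem pvLocLoop (k N : Nat) (φ : Nat → List Int) (n rlI llI D cI : Int)
    (body : Nat → Int) (I : Nat)
    (hidx : ∀ i : Nat, i < k → ((rlI + llI) + PySem.Int.floordiv (n + ↑i) D * (cI - 1)).toNat = I) :
    (List.range k).foldl (fun (st : List (List Int) × Int) (loc : Nat) =>
        (st.1.modify ((rlI + llI) + PySem.Int.floordiv st.2 D * (cI - 1)).toNat
           (fun row => row ++ [body loc]), st.2 + 1))
      ((List.range N).map φ, n)
    = ((List.range N).map (fun j => if j = I then φ j ++ (List.range k).map body else φ j),
       n + ↑k) := by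
  induction k with
  | zero => simp
  | succ k ih =>
    rw [List.range_succ, List.foldl_append,
        ih (fun i hi => hidx i (Nat.lt_succ_of_lt hi))]
    simp only [List.foldl_cons, List.foldl_nil]
    rw [hidx k (Nat.lt_succ_self k), pvModifyMapRange N I]
    refine Prod.ext ?_ (by push_cast; ring)
    refine List.map_eq_map_iff.mpr (fun j hj => ?_)
    by_cases hjI : j = I <;> simp [hjI]

theorem pvLlLoop (k C N rl : Nat) (hC : 0 < C) (hN : rl * C + k ≤ N)
    (φ : Nat → List Int) (n D : Int) (body2 : Nat → Nat → Int)
    (hfd : ∀ i : Nat, i < k * C → PySem.Int.floordiv (n + ↑i) D = ↑rl) :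
    (List.range k).foldl (fun (st : List (List Int) × Int) (ll : Nat) =>
        (List.range C).foldl (fun (st : List (List Int) × Int) (loc : Nat) =>
          (st.1.modify (((rl : Int) + ↑ll) + PySem.Int.floordiv st.2 D * ((C : Int) - 1)).toNat
             (fun row => row ++ [body2 ll loc]), st.2 + 1)) st)
      ((List.range N).map φ, n)
    = ((List.range N).map (fun j =>
         if rl * C ≤ j ∧ j < rl * C + k then φ j ++ (List.range C).map (body2 (j - rl * C)) else φ j),
       n + ↑(k * C)) := by
  induction k generalizing φ n with
  | zero =>
    simp only [List.range_zero, List.foldl_nil, Nat.zero_mul, Nat.cast_zero, add_zero]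
    refine Prod.ext ?_ rfl
    refine (List.map_eq_map_iff.mpr (fun j hj => ?_)).symm
    simp
  | succ k ih =>
    rw [List.range_succ, List.foldl_append,
        ih (by omega) φ n (fun i hi => hfd i (by nlinarith))]
    simp only [List.foldl_cons, List.foldl_nil]
    have hloc := pvLocLoop C N
      (fun j => if rl * C ≤ j ∧ j < rl * C + k then φ j ++ (List.range C).map (body2 (j - rl * C)) else φ j)
      (n + ↑(k * C)) (↑rl) (↑k) D (↑C) (body2 k) (rl * C + k)
      (fun i hi => by
        have h1 : PySem.Int.floordiv (n + ↑(k * C) + ↑i) D = ↑rl := by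
          have := hfd (k * C + i) (by nlinarith)
          rw [← this]
          congr 1
          push_cast; ring
        rw [h1]
        have h2 : ((rl : Int) + ↑k + ↑rl * ((C : Int) - 1)) = ((rl * C + k : Nat) : Int) := by
          push_cast; ring
        rw [h2, Int.toNat_natCast])
    rw [hloc]
    refine Prod.ext ?_ (by push_cast; ring)
    refine List.map_eq_map_iff.mpr (fun j hj => ?_)
    by_cases hband : j = rl * C + k
    · simp [hband]
    · by_cases h4 : rl * C ≤ j ∧ j < rl * C + k
      · have h5 : rl * C ≤ j ∧ j < rl * C + (k + 1) := by omega
        simp [hband, h4, h5]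
      · have h6 : ¬ (rl * C ≤ j ∧ j < rl * C + (k + 1)) := by omega
        simp [hband, h4, h6]

theorem pvRegLoop (r C N rl : Nat) (hC : 0 < C) (hN : rl * C + C ≤ N)
    (φ : Nat → List Int) (n D : Int) (body3 : Nat → Nat → Nat → Int)
    (hfd : ∀ i : Nat, i < r * (C * C) → PySem.Int.floordiv (n + ↑i) D = ↑rl) :
    (List.range r).foldl (fun (st : List (List Int) × Int) (reg : Nat) =>
      (List.range C).foldl (fun (st : List (List Int) × Int) (ll : Nat) =>
        (List.range C).foldl (fun (st : List (List Int) × Int) (loc : Nat) =>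
          (st.1.modify (((rl : Int) + ↑ll) + PySem.Int.floordiv st.2 D * ((C : Int) - 1)).toNat
             (fun row => row ++ [body3 reg ll loc]), st.2 + 1)) st) st)
      ((List.range N).map φ, n)
    = ((List.range N).map (fun j =>
         if rl * C ≤ j ∧ j < rl * C + C then
           φ j ++ (List.range r).flatMap (fun reg => (List.range C).map (body3 reg (j - rl * C)))
         else φ j),
       n + ↑(r * (C * C))) := by
  induction r generalizing φ n with
  | zero =>
    simp only [List.range_zero, List.foldl_nil, Nat.zero_mul, Nat.cast_zero, add_zero,
      List.flatMap_nil, List.append_nil]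
    refine Prod.ext ?_ rfl
    refine (List.map_eq_map_iff.mpr (fun j hj => ?_)).symm
    by_cases hb : rl * C ≤ j ∧ j < rl * C + C <;> simp [hb]
  | succ r ih =>
    rw [List.range_succ, List.foldl_append,
        ih φ n (fun i hi => hfd i (by nlinarith))]
    simp only [List.foldl_cons, List.foldl_nil]
    have hll := pvLlLoop C C N rl hC hN
      (fun j => if rl * C ≤ j ∧ j < rl * C + C then
          φ j ++ (List.range r).flatMap (fun reg => (List.range C).map (body3 reg (j - rl * C)))
        else φ j)
      (n + ↑(r * (C * C))) D (body3 r)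
      (fun i hi => by
        have := hfd (r * (C * C) + i) (by nlinarith)
        rw [← this]; congr 1; push_cast; ring)
    rw [hll]
    refine Prod.ext ?_ (by push_cast; ring)
    refine List.map_eq_map_iff.mpr (fun j hj => ?_)
    by_cases hb : rl * C ≤ j ∧ j < rl * C + C
    · simp [hb, List.append_assoc]
    · simp [hb]

theorem pvRlLoop (t G C : Nat) (m : List (List (List (List Int)))) (hC : 0 < C) (ht : t ≤ G) :
    (List.range t).foldl (fun (st : List (List Int) × Int) (rl : Nat) =>
      (List.range G).foldl (fun (st : List (List Int) × Int) (reg : Nat) =>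
        (List.range C).foldl (fun (st : List (List Int) × Int) (ll : Nat) =>
          (List.range C).foldl (fun (st : List (List Int) × Int) (loc : Nat) =>
            (st.1.modify (((rl : Int) + ↑ll) + PySem.Int.floordiv st.2 ((G : Int) * (C : Int) ^ 2) * ((C : Int) - 1)).toNat
               (fun row => row ++ [pvVal m rl reg ll loc]), st.2 + 1)) st) st) st)
      ((List.range (G * C)).map (fun _ => ([] : List Int)), 0)
    = ((List.range (G * C)).map (fun j => if j < t * C then pvRow m C G (j / C) (j % C) else []),
       ↑(t * (G * (C * C)))) := by
  induction t with
  | zero =>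
    simp only [List.range_zero, List.foldl_nil, Nat.zero_mul, Nat.cast_zero]
    refine Prod.ext ?_ rfl
    refine (List.map_eq_map_iff.mpr (fun j hj => ?_)).symm
    simp
  | succ t ih =>
    have hG : 0 < G := by omega
    have hd : 0 < G * (C * C) := by positivity
    rw [List.range_succ, List.foldl_append, ih (by omega)]
    simp only [List.foldl_cons, List.foldl_nil]
    have hreg := pvRegLoop G C (G * C) t hC (by nlinarith)
      (fun j => if j < t * C then pvRow m C G (j / C) (j % C) else [])
      (↑(t * (G * (C * C)))) ((G : Int) * (C : Int) ^ 2) (fun reg ll loc => pvVal m t reg ll loc)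
      (fun i hi => by
        have hD : ((G : Int) * (C : Int) ^ 2) = ((G * (C * C) : Nat) : Int) := by push_cast; ring
        have hsum : ((t * (G * (C * C)) : Nat) : Int) + (i : Int) = ((t * (G * (C * C)) + i : Nat) : Int) := by
          push_cast; ring
        rw [hD, hsum, PySem.Int.floordiv_natCast]
        congr 1
        rw [Nat.add_comm, Nat.mul_comm t, Nat.add_mul_div_left _ _ hd, Nat.div_eq_of_lt hi]
        omega)
    rw [hreg]
    refine Prod.ext ?_ (by push_cast; ring)
    refine List.map_eq_map_iff.mpr (fun j hj => ?_)
    by_cases hb : t * C ≤ j ∧ j < t * C + C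
    · have hlt : ¬ j < t * C := by omega
      have hlt' : j < (t + 1) * C := by rw [Nat.succ_mul]; omega
      have hdiv : j / C = t := by
        obtain ⟨l, hl, rfl⟩ : ∃ l, l < C ∧ j = l + t * C := ⟨j - t * C, by omega, by omega⟩
        rw [Nat.mul_comm t C, Nat.add_mul_div_left _ _ hC, Nat.div_eq_of_lt hl]
        omega
      have hmod : j % C = j - t * C := by
        obtain ⟨l, hl, rfl⟩ : ∃ l, l < C ∧ j = l + t * C := ⟨j - t * C, by omega, by omega⟩
        rw [Nat.add_mul_mod_self_right, Nat.mod_eq_of_lt hl]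
        omega
      simp [hb, hlt, hlt', hdiv, hmod, pvRow]
    · by_cases hsm : j < t * C
      · have h7 : j < (t + 1) * C := by rw [Nat.succ_mul]; omega
        simp [hb, hsm, h7]
      · have h8 : ¬ j < (t + 1) * C := by rw [Nat.succ_mul]; omega
        simp [hb, hsm, h8]

theorem pvGather (G C : Nat) (hC : 0 < C) (f : Nat → Nat → List Int) :
    (List.range (G * C)).map (fun j => f (j / C) (j % C))
      = (List.range G).flatMap (fun rl => (List.range C).map (f rl)) := by
  induction G with
  | zero => simp
  | succ G ih =>
    rw [Nat.succ_mul, List.range_add, List.map_append, ih, List.range_succ, List.flatMap_append]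
    simp only [List.flatMap_cons, List.flatMap_nil, List.append_nil, List.map_map]
    congr 1
    refine List.map_eq_map_iff.mpr (fun l hl => ?_)
    have hlC : l < C := List.mem_range.mp hl
    simp only [Function.comp_apply]
    rw [Nat.add_comm (G * C) l, Nat.mul_comm G C, Nat.add_mul_div_left _ _ hC, Nat.div_eq_of_lt hlC,
        Nat.add_mul_mod_self_left, Nat.mod_eq_of_lt hlC]
    simp

theorem pvVal_def (m : List (List (List (List Int)))) (rl reg ll loc : Nat) :
    PySem.List.pyGetD (PySem.List.pyGetD (PySem.List.pyGetD
      (PySem.List.pyGetD m ↑rl []) ↑reg []) ↑ll []) ↑loc 0 = pvVal m rl reg ll loc := rfl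

theorem pvInit (G C : Nat) :
    (PySem.List.pyRange 0 ((G : Int) * (C : Int))).foldl (fun acc _ => acc ++ [([] : List Int)]) []
      = (List.range (G * C)).map (fun _ => ([] : List Int)) := by
  have h : ((G : Int) * (C : Int)) = ((G * C : Nat) : Int) := by push_cast; ring
  rw [h, PySem.List.pyRange_zero_natCast, List.foldl_map,
      PySem.List.foldl_append_singleton_eq_map (fun _ => ([] : List Int))]
  simp

theorem pvA_eq (m : List (List (List (List Int)))) (G C : Nat) (hC : 0 < C) :
    gluing_location m ↑G ↑C
      = (List.range G).flatMap (fun rl => (List.range C).map (fun ll => pvRow m C G rl ll)) := by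
  simp only [gluing_location]
  rw [pvInit G C]
  rw [PySem.List.pyRange_zero_natCast G, PySem.List.pyRange_zero_natCast C]
  simp only [List.foldl_map, pvVal_def]
  rw [pvRlLoop G G C m hC le_rfl]
  rw [← pvGather G C hC (fun rl ll => pvRow m C G rl ll)]
  refine List.map_eq_map_iff.mpr (fun j hj => ?_)
  have : j < G * C := List.mem_range.mp hj
  simp [this]

theorem pvB_eq (m : List (List (List (List Int)))) (G C : Nat) :
    gluing_location_alt m ↑G ↑C
      = (List.range G).flatMap (fun rl => (List.range C).map (fun ll => pvRow m C G rl ll)) := by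
  simp only [gluing_location_alt, PySem.List.pyRange_zero_natCast, List.foldl_map, pvVal_def,
    PySem.List.foldl_append_singleton_eq_map, PySem.List.foldl_append_eq_flatMap,
    List.nil_append, pvRow]

theorem pvNil_of_nonpos (m : List (List (List (List Int)))) (g c : Int)
    (hgc : g * c ≤ 0) (hng : g ≤ 0 ∨ c ≤ 0) :
    gluing_location m g c = [] ∧ gluing_location_alt m g c = [] := by
  rcases hng with hg | hc
  · simp [gluing_location, gluing_location_alt, PySem.List.pyRange_one_eq_nil hg,
      PySem.List.pyRange_one_eq_nil hgc]
  · simp [gluing_location, gluing_location_alt, PySem.List.pyRange_one_eq_nil hc,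
      PySem.List.pyRange_one_eq_nil hgc, List.foldl_fixed]

theorem gluing_location_spec' : ∀ (m : List (List (List (List Int)))) (g c : Int),
    ¬ D_gluing_location m g c → gluing_location m g c = gluing_location_alt m g c := by
  intro m g c hnd
  unfold D_gluing_location at hnd
  by_cases hg : 0 < g
  · by_cases hc : 0 < c
    · obtain ⟨G, rfl⟩ := Int.eq_ofNat_of_zero_le hg.le
      obtain ⟨C, rfl⟩ := Int.eq_ofNat_of_zero_le hc.le
      rw [pvA_eq m G C (by exact_mod_cast hc), pvB_eq m G C]
    · have hc' : c ≤ 0 := by omega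
      have hgc : g * c ≤ 0 := mul_nonpos_of_nonneg_of_nonpos hg.le hc'
      obtain ⟨h1, h2⟩ := pvNil_of_nonpos m g c hgc (Or.inr hc')
      rw [h1, h2]
  · have hg' : g ≤ 0 := by omega
    have hgc : g * c ≤ 0 := by
      rcases hg'.lt_or_eq with hlt | heq
      · have hc0 : 0 ≤ c := by
          by_contra hcn
          exact hnd ⟨hlt, by omega⟩
        exact mul_nonpos_of_nonpos_of_nonneg hg' hc0
      · rw [heq]; simp
    obtain ⟨h1, h2⟩ := pvNil_of_nonpos m g c hgc (Or.inl hg')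
    rw [h1, h2]

theorem gluing_location_tight' : ∀ (m : List (List (List (List Int)))) (g c : Int),
    D_gluing_location m g c → gluing_location m g c ≠ gluing_location_alt m g c := by
  intro m g c hd
  obtain ⟨hg, hc⟩ := hd
  have hgc : 0 < g * c := mul_pos_of_neg_of_neg hg hc
  have hA : gluing_location m g c
      = (PySem.List.pyRange 0 (g * c)).map (fun _ => ([] : List Int)) := by
    simp [gluing_location, PySem.List.pyRange_one_eq_nil hg.le,
      PySem.List.foldl_append_singleton_eq_map (fun _ => ([] : List Int))]
  have hB : gluing_location_alt m g c = [] := by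
    simp [gluing_location_alt, PySem.List.pyRange_one_eq_nil hg.le]
  rw [hA, hB]
  intro h
  have h0 : (0 : Int) ∈ PySem.List.pyRange 0 (g * c) := by
    rw [PySem.List.mem_pyRange_one]
    omega
  rw [List.map_eq_nil_iff.mp h] at h0
  simp at h0

-- ===== VERDICT (by name: the statement is the Claim_ definition above) =====
theorem gluing_location_spec : Claim_unchanged_gluing_location := by
  intro raw_gluing_map grid count_block _ _
  unfold Spec_gluing_location
  intro hnd
  exact gluing_location_spec' raw_gluing_map grid count_block hnd
theorem gluing_location_changed : Claim_changed_gluing_location := by unfold Claim_changed_gluing_location; decide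
theorem gluing_location_tight : Claim_exact_gluing_location := by
  intro raw_gluing_map grid count_block _ _ hd
  exact gluing_location_tight' raw_gluing_map grid count_block hd
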